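-- pv_equiv track=rewrite | github.com/adfio1234/Algorithms | SWEA/D3/1215. ［S／W 문제해결 기본］ 3일차 － 회문1/［S／W 문제해결 기본］ 3일차 － 회문1.py | searchPalindrome
-- ===== SOURCE A (Python) =====
-- def searchPalindrome(length,arr):
--     total=0
--     for i in arr:
--         for j in range(len(i)-length+1):
--             tmp=i[0+j:length+j]
--             if tmp==tmp[::-1]:
--                 total+=1
--     return total
-- ===== SOURCE B (Python) =====
-- def searchPalindrome(length, arr):
--     return sum(_count_row(s, length) for s in arr)
--
--
-- def _count_row(s, length):
--     c = 0
--     for j in range(len(s) - length + 1):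
--         if _is_pal(s, j, j + length):
--             c += 1
--     return c
--
--
-- def _is_pal(s, lo, hi):
--     # two-pointer half comparison with early exit; s[lo:hi] is a palindrome
--     while lo < hi - 1:
--         if s[lo] != s[hi - 1]:
--             return False
--         lo += 1
--         hi -= 1
--     return True
-- ===== Notes on version B (the rewrite author's own statement) =====
-- stated objective: alternative
-- what changed: B tests each window with an in-place two-pointer half-comparison with early exit instead of materializing the slice and its full reversed copy, and sums per-row counts instead of threading one running total; Pre_ excludes negative length with a row long enough for a nonempty window, where Python's negative slice-stop wraparound makes A test windows taken from the end of the row.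
-- outside the precondition, e.g. on searchPalindrome(-1, ['abcd']): A returns 5, B returns 6
import Mathlib
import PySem

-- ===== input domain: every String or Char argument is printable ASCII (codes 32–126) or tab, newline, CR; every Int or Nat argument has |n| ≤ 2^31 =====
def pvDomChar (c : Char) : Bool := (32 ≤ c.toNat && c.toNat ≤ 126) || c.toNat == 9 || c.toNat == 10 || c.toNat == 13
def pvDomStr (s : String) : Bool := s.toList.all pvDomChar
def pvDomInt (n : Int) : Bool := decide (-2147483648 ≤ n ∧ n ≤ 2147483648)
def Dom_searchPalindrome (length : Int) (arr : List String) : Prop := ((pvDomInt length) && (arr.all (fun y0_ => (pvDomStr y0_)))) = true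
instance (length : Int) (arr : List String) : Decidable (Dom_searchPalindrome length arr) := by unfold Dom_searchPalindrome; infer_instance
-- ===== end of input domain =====

-- B changes the palindrome test to an in-place two-pointer half comparison (no slice/reverse
-- copies) and sums per-row counts; equivalence is claimed on Pre_ (stated below).

-- ===== PORT A =====
def searchPalindrome (length : Int) (arr : List String) : Int :=
  arr.foldl (fun total i =>
    (PySem.List.pyRange 0 (PySem.Str.len i - length + 1) 1).foldl (fun total j =>
      let tmp := PySem.Str.slice i (some (0 + j)) (some (length + j))
      match PySem.Str.slice? tmp none none (-1) with   -- tmp[::-1]; step -1 never raises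
      | some r => if tmp == r then total + 1 else total
      | none => total) total) 0

-- ===== PORT B =====
-- two-pointer half comparison on s[lo:hi]; every index the loop reads is in range
-- on every call the port makes, so pyGetD's default is never used.
def pvIsPal (cs : List Char) (lo hi : Int) : Bool :=
  if lo < hi - 1 then
    if PySem.List.pyGetD cs lo ' ' ≠ PySem.List.pyGetD cs (hi - 1) ' ' then false
    else pvIsPal cs (lo + 1) (hi - 1)
  else true
termination_by (hi - lo).toNat
decreasing_by omega

def pvCountRow (s : String) (length : Int) : Int :=
  (PySem.List.pyRange 0 (PySem.Str.len s - length + 1) 1).foldl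
    (fun c j => if pvIsPal s.toList j (j + length) then c + 1 else c) 0

def searchPalindrome_alt (length : Int) (arr : List String) : Int :=
  (arr.map (fun s => pvCountRow s length)).sum

-- ===== PRECONDITION & SPEC =====
-- Pre_ excludes negative length when some row is long enough to yield a nonempty window: there
-- Python's negative slice-stop wraparound makes A test windows taken from the end of the row —
-- a meaningless corner where neither behaviour is specified.
def Pre_searchPalindrome (length : Int) (arr : List String) : Prop :=
  0 ≤ length ∨ ∀ s ∈ arr, (s.toList.length : Int) ≤ -length
instance (length : Int) (arr : List String) : Decidable (Pre_searchPalindrome length arr) := by unfold Pre_searchPalindrome; infer_instance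
def pvWitness_searchPalindrome : Int × List String := (3, ["aba x", "zz"])

def Spec_searchPalindrome (length : Int) (arr : List String) (out : Int) : Prop := out = searchPalindrome_alt length arr
instance (length : Int) (arr : List String) (out : Int) : Decidable (Spec_searchPalindrome length arr out) := by unfold Spec_searchPalindrome; infer_instance

-- ===== CLAIM (what is proved, stated in full; the proofs are below) =====
def Claim_equal_searchPalindrome : Prop := ∀ (length : Int) (arr : List String), Dom_searchPalindrome length arr → Pre_searchPalindrome length arr → Spec_searchPalindrome length arr (searchPalindrome length arr)

-- ===== LEMMAS AND PROOFS =====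

-- a list of length ≤ 1 is its own reverse
theorem pvRevShort (t : List Char) (h : t.length ≤ 1) : t.reverse = t := by
  match t with
  | [] => rfl
  | [a] => rfl
  | a :: b :: r => simp at h

-- decomposition of a window into first char, middle, last char
theorem pvDecomp (cs : List Char) (a b : Nat) (h1 : a + 2 ≤ b) (h2 : b ≤ cs.length)
    (ha : a < cs.length) (hb : b - 1 < cs.length) :
    (cs.drop a).take (b - a) = cs[a] :: (((cs.drop (a+1)).take (b - a - 2)) ++ [cs[b-1]]) := by
  rw [List.drop_eq_getElem_cons ha]
  have hba : b - a = (b - a - 1) + 1 := by omega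
  rw [hba, List.take_succ_cons]
  congr 1
  have hm : b - a - 1 = (b - a - 2) + 1 := by omega
  rw [hm, List.take_succ]
  congr 1
  rw [List.getElem?_drop]
  have : a + 1 + (b - a - 2) = b - 1 := by omega
  rw [this, List.getElem?_eq_getElem hb]
  rfl

theorem pvPalStep (x y : Char) (m : List Char) :
    x :: (m ++ [y]) = (x :: (m ++ [y])).reverse ↔ (x = y ∧ m = m.reverse) := by
  have hrev : (x :: (m ++ [y])).reverse = y :: (m.reverse ++ [x]) := by simp
  rw [hrev]
  constructor
  · intro h
    have hxy : x = y := (List.cons.injEq ..).mp h |>.1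
    have htail : m ++ [y] = m.reverse ++ [x] := (List.cons.injEq ..).mp h |>.2
    subst hxy
    exact ⟨rfl, List.append_cancel_right htail⟩
  · rintro ⟨rfl, hm⟩
    rw [← hm]

theorem pvIsPal_iff_fuel (k : Nat) : ∀ (cs : List Char) (lo hi : Int), (hi - lo).toNat ≤ k →
    0 ≤ lo → 0 ≤ hi → hi ≤ (cs.length : Int) →
    ((pvIsPal cs lo hi = true) ↔
      PySem.List.slice cs (some lo) (some hi) = (PySem.List.slice cs (some lo) (some hi)).reverse) := by
  induction k with
  | zero =>
    intro cs lo hi hk hlo hhi0 hhi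
    rw [pvIsPal]
    have hshort : (PySem.List.slice cs (some lo) (some hi)).length ≤ 1 := by
      rw [PySem.List.length_slice]
      unfold PySem.List.clampIdx
      split_ifs <;> omega
    have hnot : ¬ (lo < hi - 1) := by omega
    simp only [if_neg hnot]
    simp [pvRevShort _ hshort]
  | succ k ih =>
    intro cs lo hi hk hlo hhi0 hhi
    rw [pvIsPal]
    by_cases hlt : lo < hi - 1
    · have hab : lo.toNat + 2 ≤ hi.toNat := by omega
      have hblen : hi.toNat ≤ cs.length := by omega
      have ha : lo.toNat < cs.length := by omega
      have hb : hi.toNat - 1 < cs.length := by omega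
      have hslice : PySem.List.slice cs (some lo) (some hi) =
          cs[lo.toNat] :: (((cs.drop (lo.toNat+1)).take (hi.toNat - lo.toNat - 2)) ++ [cs[hi.toNat-1]]) := by
        rw [PySem.List.slice_toNat cs hlo hhi0]
        exact pvDecomp cs lo.toNat hi.toNat hab hblen ha hb
      have hmid : PySem.List.slice cs (some (lo+1)) (some (hi-1)) =
          (cs.drop (lo.toNat+1)).take (hi.toNat - lo.toNat - 2) := by
        rw [PySem.List.slice_toNat cs (by omega) (by omega : (0:Int) ≤ hi - 1)]
        have h1 : (lo+1).toNat = lo.toNat + 1 := by omega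
        have h2 : (hi-1).toNat = hi.toNat - 1 := by omega
        rw [h1, h2]
        congr 1
        omega
      have hgl : PySem.List.pyGetD cs lo ' ' = cs[lo.toNat] := by
        rw [PySem.List.pyGetD_of_nonneg cs ' ' hlo]
        exact List.getD_eq_getElem cs ' ' ha
      have hgr : PySem.List.pyGetD cs (hi-1) ' ' = cs[hi.toNat-1] := by
        rw [PySem.List.pyGetD_of_nonneg cs ' ' (by omega)]
        have h2 : (hi-1).toNat = hi.toNat - 1 := by omega
        rw [h2]
        exact List.getD_eq_getElem cs ' ' hb
      have hih := ih cs (lo+1) (hi-1) (by omega) (by omega) (by omega) (by omega)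
      rw [hmid] at hih
      simp only [if_pos hlt, hgl, hgr, hslice]
      rw [pvPalStep]
      by_cases hxy : cs[lo.toNat] = cs[hi.toNat - 1]
      · rw [if_neg (not_not_intro hxy), hih]
        constructor
        · intro h; exact ⟨hxy, h⟩
        · intro h; exact h.2
      · rw [if_pos hxy]
        simp only [Bool.false_eq_true, false_iff]
        intro h; exact hxy h.1
    · have hshort : (PySem.List.slice cs (some lo) (some hi)).length ≤ 1 := by
        rw [PySem.List.length_slice]
        unfold PySem.List.clampIdx
        split_ifs <;> omega
      simp only [if_neg hlt]
      simp [pvRevShort _ hshort]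


theorem pvFoldlCount (p : Int → Bool) (l : List Int) : ∀ (t : Int),
    l.foldl (fun c j => if p j then c + 1 else c) t = t + (l.countP p : Int) := by
  induction l with
  | nil => intro t; simp
  | cons x xs ih => intro t; by_cases h : p x <;> simp [h, ih] <;> ring

theorem pvCondEq (L : Int) (hL : 0 ≤ L) (i : String) (j : Int)
    (hj0 : 0 ≤ j) (hj : j < (i.toList.length : Int) - L + 1) :
    (PySem.Str.slice i (some (0 + j)) (some (L + j)) ==
      String.ofList (PySem.Str.slice i (some (0 + j)) (some (L + j))).toList.reverse) =
    pvIsPal i.toList j (j + L) := by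
  rw [Bool.eq_iff_iff, beq_iff_eq]
  have htl : (PySem.Str.slice i (some (0 + j)) (some (L + j))).toList =
      PySem.List.slice i.toList (some j) (some (j + L)) := by
    rw [PySem.Str.toList_slice]
    simp only [PySem.Chars.slice_eq_listSlice]
    rw [zero_add, add_comm L j]
  constructor
  · intro h
    have h2 : (PySem.Str.slice i (some (0 + j)) (some (L + j))).toList =
        (PySem.Str.slice i (some (0 + j)) (some (L + j))).toList.reverse := by
      conv_lhs => rw [h]
      simp
    rw [htl] at h2
    exact (pvIsPal_iff_fuel ((j + L - j).toNat) i.toList j (j + L) le_rfl hj0 (by omega) (by omega)).mpr h2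
  · intro h
    have h2 := (pvIsPal_iff_fuel ((j + L - j).toNat) i.toList j (j + L) le_rfl hj0 (by omega) (by omega)).mp h
    rw [← htl] at h2
    apply String.toList_inj.mp
    simpa using h2

theorem pvCondEq_neg (L : Int) (i : String) (j : Int) (hj0 : 0 ≤ j)
    (hneg : (i.toList.length : Int) + L ≤ 0) :
    (PySem.Str.slice i (some (0 + j)) (some (L + j)) ==
      String.ofList (PySem.Str.slice i (some (0 + j)) (some (L + j))).toList.reverse) =
    pvIsPal i.toList j (j + L) := by
  have hfalse : ¬ (j < j + L - 1) := by omega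
  rw [pvIsPal, if_neg hfalse]
  have hempty : (PySem.Str.slice i (some (0 + j)) (some (L + j))).toList = [] := by
    rw [PySem.Str.toList_slice]
    simp only [PySem.Chars.slice_eq_listSlice]
    have hlen : (PySem.List.slice i.toList (some (0 + j)) (some (L + j))).length = 0 := by
      rw [PySem.List.length_slice]
      unfold PySem.List.clampIdx
      split_ifs <;> omega
    exact List.eq_nil_of_length_eq_zero hlen
  simp only [beq_iff_eq]
  apply String.toList_inj.mp
  rw [hempty]
  simp

theorem pvRowEq (L : Int) (i : String)
    (hL : 0 ≤ L ∨ (i.toList.length : Int) + L ≤ 0) : ∀ (t : Int),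
    (PySem.List.pyRange 0 (PySem.Str.len i - L + 1) 1).foldl (fun total j =>
      let tmp := PySem.Str.slice i (some (0 + j)) (some (L + j))
      match PySem.Str.slice? tmp none none (-1) with
      | some r => if tmp == r then total + 1 else total
      | none => total) t = t + pvCountRow i L := by
  intro t
  have hbody : (fun (total : Int) (j : Int) =>
      let tmp := PySem.Str.slice i (some (0 + j)) (some (L + j))
      match PySem.Str.slice? tmp none none (-1) with
      | some r => if tmp == r then total + 1 else total
      | none => total) = (fun total j =>
        if (fun j => PySem.Str.slice i (some (0 + j)) (some (L + j)) ==
            String.ofList (PySem.Str.slice i (some (0 + j)) (some (L + j))).toList.reverse) j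
        then total + 1 else total) := by
    funext total j
    simp only [PySem.Str.slice?_none_none_neg_one]
  rw [hbody, pvFoldlCount]
  unfold pvCountRow
  have hbody2 : (fun (c : Int) (j : Int) => if pvIsPal i.toList j (j + L) then c + 1 else c) =
      (fun c j => if (fun j => pvIsPal i.toList j (j + L)) j then c + 1 else c) := rfl
  rw [hbody2, pvFoldlCount, zero_add]
  have hc : List.countP (fun j => PySem.Str.slice i (some (0 + j)) (some (L + j)) ==
        String.ofList (PySem.Str.slice i (some (0 + j)) (some (L + j))).toList.reverse)
        (PySem.List.pyRange 0 (PySem.Str.len i - L + 1) 1)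
      = List.countP (fun j => pvIsPal i.toList j (j + L))
        (PySem.List.pyRange 0 (PySem.Str.len i - L + 1) 1) := by
    apply List.countP_congr
    intro j hj
    rw [PySem.Str.len_eq, PySem.List.mem_pyRange_one] at hj
    rcases hL with hL | hneg
    · simp only [pvCondEq L hL i j hj.1 hj.2]
    · simp only [pvCondEq_neg L i j hj.1 hneg]
  rw [hc]

theorem pvMain (L : Int) : ∀ (arr : List String),
    (0 ≤ L ∨ ∀ s ∈ arr, (s.toList.length : Int) ≤ -L) → ∀ (t : Int),
    arr.foldl (fun total i =>
      (PySem.List.pyRange 0 (PySem.Str.len i - L + 1) 1).foldl (fun total j =>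
        let tmp := PySem.Str.slice i (some (0 + j)) (some (L + j))
        match PySem.Str.slice? tmp none none (-1) with
        | some r => if tmp == r then total + 1 else total
        | none => total) total) t = t + (arr.map (fun s => pvCountRow s L)).sum := by
  intro arr
  induction arr with
  | nil => intro _ t; simp
  | cons x xs ih =>
    intro hL t
    have hx : 0 ≤ L ∨ (x.toList.length : Int) + L ≤ 0 := by
      rcases hL with h | h
      · exact Or.inl h
      · exact Or.inr (by have := h x (by simp); omega)
    have hxs : 0 ≤ L ∨ ∀ s ∈ xs, (s.toList.length : Int) ≤ -L := by
      rcases hL with h | h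
      · exact Or.inl h
      · exact Or.inr fun s hs => h s (by simp [hs])
    rw [List.foldl_cons, ih hxs, pvRowEq L x hx t]
    simp [add_assoc]

-- ===== VERDICT (by name: the statement is the Claim_ definition above) =====
theorem searchPalindrome_spec : Claim_equal_searchPalindrome := by
  intro length arr _ hpre
  unfold Spec_searchPalindrome searchPalindrome searchPalindrome_alt
  rw [pvMain length arr hpre 0, zero_add]
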